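-- pv_equiv track=rewrite | github.com/apache/qpid-interop-test | src/python/qpid_interop_test/amqp_complex_types_test_generator.py | _get_delimited_string_length
-- ===== SOURCE A (Python) =====
-- def _get_delimited_string_length(mixed_string):
--     """
--     Get the final length of a string literal in bytes, given that there may be embedded delimited chars
--     eg. _get_delimited_string_length('abc\t\x00\x01\x02\ndef\0') = 12
--     Only delimited strings of the form \\X (eg \\n, \\t, \\0) or hex values \\xXX are accepted
--     """
--     char_count = 0
--     delimit_flag = False
--     delimit_count = 0
--     for this_char in mixed_string:
--         if delimit_flag:
--             if delimit_count: # value > 0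
--                 delimit_count -= 1
--                 if not delimit_count:
--                     delimit_flag = False
--                     char_count += 1
--             else:
--                 if this_char == 'x':
--                     delimit_count = 2
--                 else:
--                     delimit_flag = False
--                     char_count += 1
--         elif this_char == '\\':
--             delimit_flag = True
--         else:
--             char_count += 1
--     return char_count
-- ===== SOURCE B (Python) =====
-- def _get_delimited_string_length(mixed_string):
--     n = len(mixed_string)
--     i = 0
--     count = 0
--     while i < n:
--         if mixed_string[i] == '\\':
--             if i + 1 >= n:
--                 # trailing backslash: nothing follows, counts nothing
--                 i = n
--             elif mixed_string[i + 1] == 'x':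
--                 if i + 4 <= n:
--                     # \xXX consumed as one unit
--                     count += 1
--                     i += 4
--                 else:
--                     # truncated hex escape counts nothing
--                     i = n
--             else:
--                 # \X escape, one unit
--                 count += 1
--                 i += 2
--         else:
--             count += 1
--             i += 1
--     return count
-- ===== Notes on version B (the rewrite author's own statement) =====
-- stated objective: alternative
-- what changed: Replaced the per-character state machine carrying delimit_flag/delimit_count across iterations with an index-based while loop that consumes each escape sequence (\X or \xXX) as one unit via explicit lookahead.
import Mathlib
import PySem

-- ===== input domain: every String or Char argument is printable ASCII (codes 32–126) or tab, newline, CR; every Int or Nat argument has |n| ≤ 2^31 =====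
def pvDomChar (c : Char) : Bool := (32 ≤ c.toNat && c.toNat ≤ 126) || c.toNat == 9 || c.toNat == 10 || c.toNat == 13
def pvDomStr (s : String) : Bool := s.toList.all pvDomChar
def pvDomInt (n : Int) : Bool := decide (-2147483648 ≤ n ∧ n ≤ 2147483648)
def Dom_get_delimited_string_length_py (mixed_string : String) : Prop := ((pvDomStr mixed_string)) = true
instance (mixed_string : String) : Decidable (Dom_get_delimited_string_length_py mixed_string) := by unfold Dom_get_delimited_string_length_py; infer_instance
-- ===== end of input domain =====

-- B replaces A's per-character delimit_flag/delimit_count state machine by a lookahead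
-- loop consuming each escape sequence (\X or \xXX) as one unit (objective: alternative).

-- ===== PORT A =====
-- A: per-character state machine over (char_count, delimit_flag, delimit_count)
def pvStepA : (Int × Bool × Nat) → Char → (Int × Bool × Nat)
  | (c, df, dc), ch =>
    if df then
      if dc > 0 then
        let dc' := dc - 1
        if dc' = 0 then (c + 1, false, 0) else (c, true, dc')
      else
        if ch = 'x' then (c, true, 2) else (c + 1, false, 0)
    else if ch = '\\' then (c, true, 0)
    else (c + 1, false, 0)

def get_delimited_string_length_py (mixed_string : String) : Int :=
  (mixed_string.toList.foldl pvStepA (0, false, 0)).1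

-- ===== PORT B =====
-- B: lookahead recursion consuming each escape sequence as one unit
def pvAltGo : List Char → Int
  | [] => 0
  | ch :: rest =>
    if ch = '\\' then
      match rest with
      | [] => 0                                -- trailing backslash counts nothing
      | c1 :: rest1 =>
        if c1 = 'x' then
          match rest1 with
          | _ :: _ :: rest3 => 1 + pvAltGo rest3   -- \xXX: one unit
          | _ => 0                             -- truncated hex escape counts nothing
        else 1 + pvAltGo rest1                 -- \X: one unit
    else 1 + pvAltGo rest

def get_delimited_string_length_py_alt (mixed_string : String) : Int :=
  pvAltGo mixed_string.toList

-- ===== PRECONDITION & SPEC =====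
def Spec_get_delimited_string_length_py (mixed_string : String) (out : Int) : Prop := out = get_delimited_string_length_py_alt mixed_string
instance (mixed_string : String) (out : Int) : Decidable (Spec_get_delimited_string_length_py mixed_string out) := by unfold Spec_get_delimited_string_length_py; infer_instance

-- ===== CLAIM (what is proved, stated in full; the proofs are below) =====
def Claim_equal_get_delimited_string_length_py : Prop := ∀ (mixed_string : String), Dom_get_delimited_string_length_py mixed_string → Spec_get_delimited_string_length_py mixed_string (get_delimited_string_length_py mixed_string)

-- ===== LEMMAS AND PROOFS =====
-- residual meanings of A's in-flight delimiter states
def pvG3 : List Char → Int                      -- state (true, 1): one more char to swallow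
  | [] => 0
  | _ :: r => 1 + pvAltGo r

def pvG2 : List Char → Int                      -- state (true, 2): two more chars to swallow
  | [] => 0
  | _ :: r => pvG3 r

def pvG1 : List Char → Int                      -- state (true, 0): just saw a backslash
  | [] => 0
  | c :: r => if c = 'x' then pvG2 r else 1 + pvAltGo r

theorem pvAltGo_backslash (rest : List Char) : pvAltGo ('\\' :: rest) = pvG1 rest := by
  rw [pvAltGo.eq_def]
  cases rest with
  | nil => simp [pvG1]
  | cons c1 r1 =>
    by_cases hx : c1 = 'x'
    · cases r1 with
      | nil => simp [pvG1, pvG2, hx]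
      | cons a r2 =>
        cases r2 <;> simp [pvG1, pvG2, pvG3, hx]
    · simp [pvG1, hx]

theorem pvMain (l : List Char) :
    (∀ c : Int, (l.foldl pvStepA (c, false, 0)).1 = c + pvAltGo l) ∧
    (∀ c : Int, (l.foldl pvStepA (c, true, 0)).1 = c + pvG1 l) ∧
    (∀ c : Int, (l.foldl pvStepA (c, true, 2)).1 = c + pvG2 l) ∧
    (∀ c : Int, (l.foldl pvStepA (c, true, 1)).1 = c + pvG3 l) := by
  induction l with
  | nil => simp [pvAltGo, pvG1, pvG2, pvG3]
  | cons ch rest ih =>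
    obtain ⟨ih0, ih1, ih2, ih3⟩ := ih
    refine ⟨fun c => ?_, fun c => ?_, fun c => ?_, fun c => ?_⟩
    · by_cases h : ch = '\\'
      · subst h
        simp only [List.foldl, pvStepA]
        norm_num
        rw [ih1, pvAltGo_backslash]
      · simp only [List.foldl, pvStepA]
        simp only [if_neg Bool.false_ne_true, if_neg h]
        rw [ih0]
        conv_rhs => rw [pvAltGo.eq_def]
        simp [h]
        try ring
    · by_cases hx : ch = 'x'
      · subst hx
        simp only [List.foldl, pvStepA]
        norm_num
        rw [ih2, pvG1]
        norm_num
      · simp only [List.foldl, pvStepA]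
        simp only [if_neg hx]
        norm_num
        rw [ih0, pvG1.eq_def]
        simp only [if_neg hx]
        ring
    · simp only [List.foldl, pvStepA]
      norm_num
      rw [ih3, pvG2]
    · simp only [List.foldl, pvStepA]
      norm_num
      rw [ih0, pvG3]
      ring

-- ===== VERDICT (by name: the statement is the Claim_ definition above) =====
theorem get_delimited_string_length_py_spec : Claim_equal_get_delimited_string_length_py := by
  intro s _
  unfold Spec_get_delimited_string_length_py get_delimited_string_length_py
    get_delimited_string_length_py_alt
  have h := (pvMain s.toList).1 0
  rw [h, zero_add]
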